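-- pv_equiv track=rewrite | github.com/tnick1502/Reports | Report.py | zap
-- ===== SOURCE A (Python) =====
-- def zap(s, m):  # Количство знаков после запятой. s - число в str, m - число знаков
--     if s != "-":
--
--         try:
--
--             i = s.index(",")
--
--             if len(s) - i > m:
--                 s = s[0:i + m + 1]
--             elif len(s) - i <= m:
--                 for i in range(m - len(s) + i + 1):
--                     s += "0"
--
--         except ValueError:
--             s += ","
--             for i in range(m):
--                 s += "0"
--
--         return s
--     else:
--         return s
-- ===== SOURCE B (Python) =====
-- def zap(s, m):
--     if s == "-":
--         return s
--     if "," not in s: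
--         s = s + ","
--     i = s.index(",")
--     head, frac = s[:i + 1], s[i + 1:]
--     return head + (frac + "0" * m)[:m]
-- ===== Notes on version B (the rewrite author's own statement) =====
-- stated objective: simpler
-- what changed: B replaces A's three-way truncate/pad/except branching with a single uniform computation: ensure a comma, split at it, and return head + (frac + '0'*m)[:m], which both truncates and pads in one slice instead of A's per-character append loop.
-- intended difference: For m < 0 with a comma in s (and s != '-'), A's slice s[0:i+m+1] wraps to a negative endpoint and cuts into the integer part (e.g. zap('1,23',-1) = '1'), while B keeps the head and merely drops trailing fraction digits ('1,2'), which is the intended reading of 'm decimal places' for a degenerate m. — e.g. on zap("1,23", -1): A returns "1", B returns "1,2"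
import Mathlib
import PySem

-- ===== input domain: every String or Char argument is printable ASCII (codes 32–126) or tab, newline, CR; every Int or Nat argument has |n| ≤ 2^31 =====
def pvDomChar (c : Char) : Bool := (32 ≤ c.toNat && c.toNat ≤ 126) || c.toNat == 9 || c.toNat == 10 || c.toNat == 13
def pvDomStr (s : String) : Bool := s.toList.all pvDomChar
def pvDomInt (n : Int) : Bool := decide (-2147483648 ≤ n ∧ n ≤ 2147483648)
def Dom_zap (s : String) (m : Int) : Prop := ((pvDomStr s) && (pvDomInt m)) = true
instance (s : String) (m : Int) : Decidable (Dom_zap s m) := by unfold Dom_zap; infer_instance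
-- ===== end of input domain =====

-- B replaces A's truncate/pad/except branching with one uniform 'ensure comma, split, pad-then-slice' computation (objective: simpler).

-- ===== PORT A =====
-- A's try/except around s.index(",") is ported as a branch on find = -1 (find = -1 iff s.index raises ValueError).
def zapA (cs : List Char) (m : Int) : List Char :=
  if cs ≠ ['-'] then
    let i := PySem.Chars.find cs [',']
    if i ≠ -1 then
      if (cs.length : Int) - i > m then
        PySem.List.slice cs (some 0) (some (i + m + 1))
      else if (cs.length : Int) - i ≤ m then
        (PySem.List.pyRange 0 (m - (cs.length : Int) + i + 1) 1).foldl (fun acc _ => acc ++ ['0']) cs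
      else cs
    else
      (PySem.List.pyRange 0 m 1).foldl (fun acc _ => acc ++ ['0']) (cs ++ [','])
  else cs

def zap (s : String) (m : Int) : String := String.ofList (zapA s.toList m)

-- ===== PORT B =====
def zapB (cs : List Char) (m : Int) : List Char :=
  if cs = ['-'] then cs
  else
    let t := if PySem.Chars.isIn [','] cs then cs else cs ++ [',']
    let i := PySem.Chars.find t [',']
    let head := PySem.List.slice t none (some (i + 1))
    let frac := PySem.List.slice t (some (i + 1)) none
    head ++ PySem.List.slice (frac ++ PySem.List.pyRepeat ['0'] m) none (some m)

def zap_alt (s : String) (m : Int) : String := String.ofList (zapB s.toList m)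

-- ===== PRECONDITION & SPEC =====
-- For m < 0 with a comma in s (and s ≠ "-"), A's slice s[0:i+m+1] wraps to a negative endpoint and cuts
-- into the integer part, while B only drops trailing fraction digits — B's is the intended value.
def D_zap (s : String) (m : Int) : Prop :=
  s ≠ "-" ∧ PySem.Str.isIn "," s = true ∧ m < 0
instance (s : String) (m : Int) : Decidable (D_zap s m) := by unfold D_zap; infer_instance

def Spec_zap (s : String) (m : Int) (out : String) : Prop := ¬ D_zap s m → out = zap_alt s m
instance (s : String) (m : Int) (out : String) : Decidable (Spec_zap s m out) := by unfold Spec_zap; infer_instance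

def pvDiffWitness_zap : String × Int := ("1,23", -1)
def pvDiffWitnessOut_zap : String × String := ("1", "1,2")

-- ===== CLAIM (what is proved, stated in full; the proofs are below) =====
def Claim_unchanged_zap : Prop := ∀ (s : String) (m : Int), Dom_zap s m → Spec_zap s m (zap s m)
def Claim_changed_zap : Prop := Dom_zap (pvDiffWitness_zap.1) (pvDiffWitness_zap.2) ∧ D_zap (pvDiffWitness_zap.1) (pvDiffWitness_zap.2) ∧ zap (pvDiffWitness_zap.1) (pvDiffWitness_zap.2) = pvDiffWitnessOut_zap.1 ∧ zap_alt (pvDiffWitness_zap.1) (pvDiffWitness_zap.2) = pvDiffWitnessOut_zap.2 ∧ pvDiffWitnessOut_zap.1 ≠ pvDiffWitnessOut_zap.2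

-- ===== LEMMAS AND PROOFS =====

-- A's 'for _ in range(n): s += "0"' loop appends n zeros.
theorem fold_zeros (m : Int) (init : List Char) :
    (PySem.List.pyRange 0 m 1).foldl (fun acc _ => acc ++ ['0']) init
      = init ++ List.replicate m.toNat '0' := by
  rw [PySem.List.foldl_append_singleton_eq_map (f := fun _ => '0')]
  congr 1
  rw [List.map_const', PySem.List.length_pyRange_one]
  norm_num

-- The comma B appends to a comma-free string is found exactly at the old length.
theorem find_comma_append (cs : List Char) (h : ',' ∉ cs) :
    PySem.Chars.find (cs ++ [',']) [','] = (cs.length : Int) := by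
  have hinf : [','] <:+: cs ++ [','] := by
    rw [List.singleton_infix_iff]; simp
  have hnn : 0 ≤ PySem.Chars.find (cs ++ [',']) [','] :=
    (PySem.Chars.find_nonneg_iff _ _).mpr hinf
  obtain ⟨hpre, hmin⟩ := PySem.Chars.find_spec (s := cs ++ [',']) (sub := [',']) hnn
  set f := PySem.Chars.find (cs ++ [',']) [','] with hf
  have hle : f.toNat ≤ cs.length := by
    by_contra hgt
    exact hmin cs.length (by omega) (by simp)
  rcases Nat.lt_or_ge f.toNat cs.length with hlt | hge
  · exfalso
    have : (cs ++ [',']).drop f.toNat = cs.drop f.toNat ++ [','] := by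
      rw [List.drop_append_of_le_length (by omega)]
    rw [this] at hpre
    have hhd : (cs.drop f.toNat ++ [','])[0]? = some ',' := by
      rcases hpre with ⟨t, ht⟩
      rw [← ht]; simp
    have : cs[f.toNat]? = some ',' := by
      rw [List.getElem?_append_left (by simp; omega)] at hhd
      rw [List.getElem?_drop] at hhd
      simpa using hhd
    exact h (List.mem_of_getElem? this)
  · omega

-- When a comma is present, its first index is a genuine position of the string.
theorem find_comma_present (cs : List Char) (h : [','] <:+: cs) :
    0 ≤ PySem.Chars.find cs [','] ∧ (PySem.Chars.find cs [',']).toNat < cs.length := by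
  have hnn : 0 ≤ PySem.Chars.find cs [','] := (PySem.Chars.find_nonneg_iff _ _).mpr h
  refine ⟨hnn, ?_⟩
  obtain ⟨hpre, -⟩ := PySem.Chars.find_spec (s := cs) (sub := [',']) hnn
  have := hpre.length_le
  simp at this
  have hle := PySem.Chars.find_le_length cs [',']
  omega

theorem zapA_eq_zapB (cs : List Char) (m : Int)
    (h : ¬ (cs ≠ ['-'] ∧ PySem.Chars.isIn [','] cs = true ∧ m < 0)) :
    zapA cs m = zapB cs m := by
  by_cases hd : cs = ['-']
  · simp [zapA, zapB, hd]
  · by_cases hin : PySem.Chars.isIn [','] cs = true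
    · -- comma present; h forces 0 ≤ m
      have hm : 0 ≤ m := by
        by_contra hm
        exact h ⟨hd, hin, by omega⟩
      have hinf : [','] <:+: cs := (PySem.Chars.isIn_iff_infix _ _).mp hin
      obtain ⟨hi0, hilt⟩ := find_comma_present cs hinf
      unfold zapA zapB
      rw [if_pos hd, if_neg hd]
      simp only [hin, if_pos]
      set i := PySem.Chars.find cs [','] with hidef
      rw [if_pos (show i ≠ -1 by omega)]
      rw [PySem.List.pyRepeat_singleton,
          PySem.List.slice_to cs (show (0:Int) ≤ i + 1 by omega),
          PySem.List.slice_from cs (show (0:Int) ≤ i + 1 by omega),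
          PySem.List.slice_to _ hm]
      by_cases hgt : (cs.length : Int) - i > m
      · rw [if_pos hgt, PySem.List.slice_zero_start,
            PySem.List.slice_to cs (show (0:Int) ≤ i + m + 1 by omega)]
        rw [List.take_append_of_le_length (by simp; omega)]
        have : (i + m + 1).toNat = (i + 1).toNat + m.toNat := by omega
        rw [this, List.take_add]
      · rw [if_neg hgt, if_pos (by omega), fold_zeros]
        rw [List.take_append,
            List.take_of_length_le (l := List.drop (i + 1).toNat cs) (by rw [List.length_drop]; omega),
            List.take_replicate,
            ← List.append_assoc, List.take_append_drop]
        congr 1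
        rw [List.length_drop]
        congr 1
        omega
    · -- no comma in cs
      have hmem : ',' ∉ cs := by
        intro hc
        exact hin ((PySem.Chars.isIn_iff_infix _ _).mpr ((List.singleton_infix_iff _ _).mpr hc))
      unfold zapA zapB
      rw [if_pos hd, if_neg hd]
      simp only [hin, ite_false, Bool.false_eq_true]
      rw [if_neg (by
            simp only [ne_eq, not_not]
            rw [PySem.Chars.find_eq_neg_one_iff]
            exact fun hc => hmem ((List.singleton_infix_iff _ _).mp hc))]
      rw [fold_zeros, find_comma_append cs hmem]
      rw [PySem.List.pyRepeat_singleton]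
      have h1 : ((cs.length : Int) + 1) = ((cs.length + 1 : Nat) : Int) := by push_cast; ring
      rw [h1, PySem.List.slice_to_natCast, PySem.List.slice_from_natCast]
      rw [List.take_of_length_le (by simp), List.drop_eq_nil_of_le (by simp), List.nil_append]
      by_cases hm : 0 ≤ m
      · rw [PySem.List.slice_to _ hm, List.take_replicate, Nat.min_self, List.append_assoc]
      · have : m.toNat = 0 := by omega
        rw [this]
        simp [PySem.List.slice]

-- ===== VERDICT (by name: the statement is the Claim_ definition above) =====
theorem zap_spec : Claim_unchanged_zap := by
  intro s m _ hD
  show zap s m = zap_alt s m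
  unfold zap zap_alt
  refine congrArg String.ofList (zapA_eq_zapB s.toList m ?_)
  rintro ⟨h1, h2, h3⟩
  apply hD
  refine ⟨?_, ?_, h3⟩
  · intro he; subst he; exact h1 rfl
  · simpa using h2

theorem zap_changed : Claim_changed_zap := by
  unfold Claim_changed_zap; decide
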